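-- pv_equiv track=rewrite | github.com/Evilnames/Collector | tapestry.py | _make_diamonds_pattern_grid
-- ===== SOURCE A (Python) =====
-- TAPESTRY_COLS_PER_BLOCK = 16
--
-- TAPESTRY_ROWS_PER_BLOCK = 8
--
-- def _empty(h, w=1):
--     cols = w * TAPESTRY_COLS_PER_BLOCK
--     return [[False] * cols for _ in range(h * TAPESTRY_ROWS_PER_BLOCK)]
--
-- def _make_diamonds_pattern_grid(height, width=1):
--     cols = width * TAPESTRY_COLS_PER_BLOCK
--     rows = height * TAPESTRY_ROWS_PER_BLOCK
--     g = _empty(height, width)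
--     for r in range(rows):
--         for c in range(cols):
--             mr = r % 8
--             mc = c % 8
--             if abs(mr - 4) + abs(mc - 4) <= 3:
--                 g[r][c] = True
--     return g
-- ===== SOURCE B (Python) =====
-- TAPESTRY_COLS_PER_BLOCK = 16
--
-- TAPESTRY_ROWS_PER_BLOCK = 8
--
-- def _make_diamonds_pattern_grid(height, width=1):
--     cols = width * TAPESTRY_COLS_PER_BLOCK
--     rows = height * TAPESTRY_ROWS_PER_BLOCK
--     if rows <= 0:
--         return []
--     # Phase 1: the eight distinct row templates of the 8x8 diamond tile.
--     templates = [[abs(mr - 4) + abs(c % 8 - 4) <= 3 for c in range(cols)]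
--                  for mr in range(8)]
--     # Phase 2: tile them vertically; copy each so rows are independent lists.
--     return [list(templates[r % 8]) for r in range(rows)]
-- ===== Notes on version B (the rewrite author's own statement) =====
-- stated objective: faster
-- what changed: B precomputes the eight distinct row templates of the 8x8 diamond tile once (and returns [] immediately when rows <= 0), then builds the grid by tiling copies of templates[r % 8], replacing A's per-cell nested abs-arithmetic over the whole grid.
import Mathlib
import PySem

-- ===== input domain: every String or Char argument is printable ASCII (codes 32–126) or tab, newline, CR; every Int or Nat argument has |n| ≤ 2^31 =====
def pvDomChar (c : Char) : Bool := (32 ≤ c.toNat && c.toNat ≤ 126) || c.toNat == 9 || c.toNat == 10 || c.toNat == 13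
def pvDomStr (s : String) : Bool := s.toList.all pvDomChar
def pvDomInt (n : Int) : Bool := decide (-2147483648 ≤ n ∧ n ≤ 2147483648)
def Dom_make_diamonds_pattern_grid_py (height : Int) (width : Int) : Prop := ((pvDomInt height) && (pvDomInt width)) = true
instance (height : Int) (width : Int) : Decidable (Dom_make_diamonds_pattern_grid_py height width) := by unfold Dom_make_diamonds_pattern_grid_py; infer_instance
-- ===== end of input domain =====

-- B builds the eight row templates of the 8x8 diamond tile once and tiles them by r % 8,
-- instead of A's per-cell nested abs-arithmetic over the whole grid (measured faster in a timing run).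

-- ===== PORT A =====
def pvTapestryColsPerBlock : Int := 16
def pvTapestryRowsPerBlock : Int := 8

-- _empty(h, w): '[False] * cols' clamps a negative cols at 0, as Python's list repetition does
def pvEmpty (h : Int) (w : Int) : List (List Bool) :=
  let cols := w * pvTapestryColsPerBlock
  (PySem.List.pyRange 0 (h * pvTapestryRowsPerBlock)).map
    (fun _ => List.replicate cols.toNat false)

-- g[r][c] = True: r and c come from range(rows)/range(cols), so they are nonnegative
-- in-range indices; .toNat and List.modify/List.set are exact for them
def pvSetCell (g : List (List Bool)) (r c : Int) (v : Bool) : List (List Bool) :=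
  g.modify r.toNat (fun row => row.set c.toNat v)

def make_diamonds_pattern_grid_py (height : Int) (width : Int) : List (List Bool) :=
  let cols := width * pvTapestryColsPerBlock
  let rows := height * pvTapestryRowsPerBlock
  let g := pvEmpty height width
  (PySem.List.pyRange 0 rows).foldl (fun g r =>
    (PySem.List.pyRange 0 cols).foldl (fun g c =>
      let mr := PySem.Int.mod r 8
      let mc := PySem.Int.mod c 8
      if |mr - 4| + |mc - 4| ≤ 3 then pvSetCell g r c true else g) g) g

-- ===== PORT B =====
-- templates[r % 8]: the index is always in [0, 8), so the total lookup with default [] is exact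
def make_diamonds_pattern_grid_py_alt (height : Int) (width : Int) : List (List Bool) :=
  let cols := width * pvTapestryColsPerBlock
  let rows := height * pvTapestryRowsPerBlock
  if rows ≤ 0 then []
  else
    let templates := (PySem.List.pyRange 0 8).map (fun mr =>
      (PySem.List.pyRange 0 cols).map (fun c =>
        decide (|mr - 4| + |PySem.Int.mod c 8 - 4| ≤ 3)))
    (PySem.List.pyRange 0 rows).map (fun r =>
      PySem.List.pyGetD templates (PySem.Int.mod r 8) [])

-- ===== PRECONDITION & SPEC =====
def Spec_make_diamonds_pattern_grid_py (height : Int) (width : Int) (out : List (List Bool)) : Prop := out = make_diamonds_pattern_grid_py_alt height width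
instance (height : Int) (width : Int) (out : List (List Bool)) : Decidable (Spec_make_diamonds_pattern_grid_py height width out) := by unfold Spec_make_diamonds_pattern_grid_py; infer_instance

-- ===== CLAIM (what is proved, stated in full; the proofs are below) =====
def Claim_equal_make_diamonds_pattern_grid_py : Prop := ∀ (height : Int) (width : Int), Dom_make_diamonds_pattern_grid_py height width → Spec_make_diamonds_pattern_grid_py height width (make_diamonds_pattern_grid_py height width)

-- ===== LEMMAS AND PROOFS =====

-- the cell predicate both programs compute
def pvCond (r c : Int) : Bool :=
  decide (|PySem.Int.mod r 8 - 4| + |PySem.Int.mod c 8 - 4| ≤ 3)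

theorem pv_modify_modify {α : Type} (l : List α) (i : Nat) (f h : α → α) :
    (l.modify i f).modify i h = l.modify i (fun x => h (f x)) := by
  apply List.ext_getElem
  · simp
  · intro j h1 h2
    simp only [List.getElem_modify]
    split <;> simp_all

-- hoist the constant-row modify out of the inner column loop
theorem pv_inner_hoist (ri : Nat) (p : Int → Bool) (cs : List Int) (g : List (List Bool)) :
    cs.foldl (fun g c => if p c then g.modify ri (fun row => row.set c.toNat true) else g) g
      = g.modify ri (fun row =>
          cs.foldl (fun row c => if p c then row.set c.toNat true else row) row) := by
  induction cs generalizing g with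
  | nil => exact (List.modify_id ri g).symm
  | cons c cs ih =>
    simp only [List.foldl_cons]
    by_cases hp : p c
    · simp [hp, ih, pv_modify_modify]
    · simp [hp, ih]

theorem pv_mapIdx_id {α : Type} (l : List α) : l.mapIdx (fun _ x => x) = l := by
  apply List.ext_getElem <;> simp

theorem pv_foldl_modify_range {α : Type} (F : Nat → α → α) (n : Nat) (g : List α) :
    (List.range n).foldl (fun g i => g.modify i (F i)) g
      = g.mapIdx (fun i x => if i < n then F i x else x) := by
  induction n with
  | zero => simpa using (pv_mapIdx_id g).symm
  | succ n ih =>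
    rw [List.range_succ, List.foldl_append, List.foldl_cons, List.foldl_nil, ih]
    apply List.ext_getElem
    · simp
    · intro j hj hj'
      simp only [List.getElem_modify, List.getElem_mapIdx]
      rcases eq_or_ne n j with h | h
      · subst h; simp
      · simp only [if_neg h]
        by_cases hlt : j < n
        · simp [hlt, Nat.lt_succ_of_lt hlt]
        · have hn1 : ¬ j < n + 1 := by omega
          simp [hlt, hn1]

theorem pv_mapIdx_replicate {α β : Type} (f : Nat → α → β) (n : Nat) (a : α) :
    (List.replicate n a).mapIdx f = (List.range n).map (fun i => f i a) := by
  apply List.ext_getElem <;> simp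

-- the inner column loop on a fresh all-False row is the row template
theorem pv_row_fold (p : Int → Bool) (m : Nat) :
    (List.range m).foldl (fun (row : List Bool) (j : Nat) => if p j then row.set j true else row)
        (List.replicate m false)
      = (List.range m).map (fun (j : Nat) => p j) := by
  have hstep : (fun (row : List Bool) (j : Nat) => if p j then row.set j true else row)
      = fun (row : List Bool) (j : Nat) => row.modify j (fun x => if p j then true else x) := by
    funext row j
    by_cases hp : p (j : Nat)
    · simp [hp, List.set_eq_modify]
    · simp only [hp, Bool.false_eq_true, if_false]
      exact (List.modify_id j row).symm
  rw [hstep, pv_foldl_modify_range, pv_mapIdx_replicate]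
  apply List.map_congr_left
  intro j hj
  simp at hj
  simp [hj]

-- the Nat-level core of A
theorem pv_main (R C : Nat) :
    ((List.range R).map (fun (k : Nat) => (k : Int))).foldl (fun g r =>
        (((List.range C).map (fun (j : Nat) => (j : Int))).foldl (fun g c =>
          if |PySem.Int.mod r 8 - 4| + |PySem.Int.mod c 8 - 4| ≤ 3
          then g.modify r.toNat (fun row => row.set c.toNat true) else g)) g)
      (List.replicate R (List.replicate C false))
      = (List.range R).map (fun (k : Nat) => (List.range C).map (fun (j : Nat) => pvCond (k : Int) (j : Int))) := by
  simp only [List.foldl_map, Int.toNat_natCast]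
  have h1 : ∀ (k : Nat) (g : List (List Bool)),
      (List.range C).foldl (fun (g : List (List Bool)) (j : Nat) =>
          if |PySem.Int.mod (k : Int) 8 - 4| + |PySem.Int.mod (j : Int) 8 - 4| ≤ 3
          then g.modify k (fun row => row.set j true) else g) g
        = g.modify k (fun row => (List.range C).foldl
            (fun (row : List Bool) (j : Nat) => if pvCond (k : Int) (j : Int) then row.set j true else row) row) := by
    intro k g
    have h := pv_inner_hoist k (fun c => pvCond (k : Int) c)
        ((List.range C).map (fun (j : Nat) => (j : Int))) g
    simp only [List.foldl_map, Int.toNat_natCast] at h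
    simpa [pvCond] using h
  simp only [h1]
  rw [pv_foldl_modify_range, pv_mapIdx_replicate]
  apply List.map_congr_left
  intro k hk
  simp only [List.mem_range] at hk
  rw [if_pos hk, pv_row_fold (fun c => pvCond (k : Int) c) C]

-- A computes the grid of pvCond values
theorem pvA_eq (height width : Int) :
    make_diamonds_pattern_grid_py height width
      = (List.range (height * 8).toNat).map (fun (k : Nat) =>
          (List.range (width * 16).toNat).map (fun (j : Nat) => pvCond (k : Int) (j : Int))) := by
  unfold make_diamonds_pattern_grid_py pvEmpty pvSetCell pvTapestryColsPerBlock pvTapestryRowsPerBlock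
  dsimp only
  rw [PySem.List.pyRange_one 0 (height * 8), PySem.List.pyRange_one 0 (width * 16)]
  simp only [Int.sub_zero, zero_add]
  have hinit : ((List.range (height * 8).toNat).map (fun (k : Nat) => (k : Int))).map
      (fun _ => List.replicate (width * 16).toNat false)
      = List.replicate (height * 8).toNat (List.replicate (width * 16).toNat false) := by
    simp [Function.comp_def, List.map_const']
  rw [hinit]
  exact pv_main (height * 8).toNat (width * 16).toNat

-- B computes the same grid
theorem pvB_eq (height width : Int) :
    make_diamonds_pattern_grid_py_alt height width
      = (List.range (height * 8).toNat).map (fun (k : Nat) =>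
          (List.range (width * 16).toNat).map (fun (j : Nat) => pvCond (k : Int) (j : Int))) := by
  unfold make_diamonds_pattern_grid_py_alt pvTapestryColsPerBlock pvTapestryRowsPerBlock
  dsimp only
  by_cases hr : height * 8 ≤ 0
  · rw [if_pos hr]
    have : (height * 8).toNat = 0 := by omega
    simp [this]
  rw [if_neg hr]
  rw [PySem.List.pyRange_one 0 (height * 8)]
  simp only [Int.sub_zero, zero_add, List.map_map, Function.comp_def]
  apply List.map_congr_left
  intro k _
  rw [PySem.List.pyGetD_map_pyRange_of_nonneg _ 8 _ []
      (PySem.Int.mod_nonneg _ (by norm_num)) (PySem.Int.mod_lt _ (by norm_num))]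
  rw [PySem.List.pyRange_one 0 (width * 16)]
  simp [List.map_map, Function.comp, pvCond]

-- ===== VERDICT (by name: the statement is the Claim_ definition above) =====
theorem make_diamonds_pattern_grid_py_spec : Claim_equal_make_diamonds_pattern_grid_py := by
  intro height width _
  unfold Spec_make_diamonds_pattern_grid_py
  rw [pvA_eq, pvB_eq]
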